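-- pv_equiv track=rewrite | github.com/Nghia03092004/nghia03092004.github.io | project_euler_unified/problem_510/solution.py | find_solutions_parametric
-- ===== SOURCE A (Python) =====
-- from math import gcd, isqrt
--
-- def check_descartes(a: int, b: int, c: int) -> bool:
--     """Check if (a, b, c) satisfies the tangent circle equation."""
--     lhs = a*a*b*b + b*b*c*c + a*a*c*c
--     rhs = 2*a*b*c*(a + b + c)
--     return lhs == rhs
--
-- def find_solutions_parametric(N: int) -> list:
--     """
--     Find all triples (a, b, c) with a <= b <= c, a+b+c <= N satisfying
--     a^2*b^2 + b^2*c^2 + a^2*c^2 = 2*a*b*c*(a+b+c).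
--
--     Parameterization: a = d*u^2, b = d*v^2 (gcd(u,v) can be anything)
--     c = d*u^2*v^2 / (u-v)^2  or  c = d*u^2*v^2 / (u+v)^2
--
--     We enumerate d, u, v.
--     """
--     solutions = set()
--
--     # Using c = d*u^2*v^2 / (u +/- v)^2
--     # with a = d*u^2, b = d*v^2, u > v >= 1
--
--     max_d = N  # a = d*1 at minimum
--     for u in range(1, isqrt(N) + 2):
--         for v in range(1, u + 1):
--             # Case 1: denominator = (u - v)^2
--             if u > v:
--                 denom1 = (u - v) ** 2
--                 # c = d * u^2 * v^2 / denom1, need denom1 | d * u^2 * v^2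
--                 # a = d*u^2, b = d*v^2, a <= b means u <= v (but u > v here)
--                 # so a = d*u^2 >= d*v^2 = b, meaning b <= a
--                 # We want a <= b <= c, so sort the triple
--
--                 # For c to be integer: denom1 | d * u^2 * v^2
--                 # Let g = gcd(u^2 * v^2, denom1)
--                 # Need denom1/g | d
--                 g1 = gcd(u * u * v * v, denom1)
--                 step1 = denom1 // g1  # d must be multiple of step1
--
--                 for d in range(step1, N + 1, step1):
--                     a_val = d * u * u
--                     b_val = d * v * v
--                     c_val = d * u * u * v * v // denom1
--
--                     if c_val <= 0:
--                         continue
--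
--                     triple = tuple(sorted([a_val, b_val, c_val]))
--                     if triple[0] + triple[1] + triple[2] > N:
--                         if d == step1:
--                             break
--                         continue
--                     if triple[0] >= 1:
--                         # Verify
--                         if check_descartes(*triple):
--                             solutions.add(triple)
--
--             # Case 2: denominator = (u + v)^2
--             denom2 = (u + v) ** 2
--             g2 = gcd(u * u * v * v, denom2)
--             step2 = denom2 // g2
--
--             for d in range(step2, N + 1, step2):
--                 a_val = d * u * u
--                 b_val = d * v * v
--                 c_val = d * u * u * v * v // denom2
--
--                 if c_val <= 0:
--                     continue
--
--                 triple = tuple(sorted([a_val, b_val, c_val]))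
--                 if triple[0] + triple[1] + triple[2] > N:
--                     if d == step2:
--                         break
--                     continue
--                 if triple[0] >= 1:
--                     if check_descartes(*triple):
--                         solutions.add(triple)
--
--     return sorted(solutions)
-- ===== SOURCE B (Python) =====
-- from math import gcd, isqrt
--
-- def check_descartes(a: int, b: int, c: int) -> bool:
--     """Check if (a, b, c) satisfies the tangent circle equation."""
--     lhs = a*a*b*b + b*b*c*c + a*a*c*c
--     rhs = 2*a*b*c*(a + b + c)
--     return lhs == rhs
--
-- def find_solutions_parametric(N: int) -> list:
--     """Same enumeration as A, but the inner d-scan to N is replaced by a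
--     direct bound: the triple's sum is k*S (monotone in k), so only
--     k = 1 .. N//S can satisfy a+b+c <= N."""
--     solutions = set()
--     for u in range(1, isqrt(N) + 2):
--         for v in range(1, u + 1):
--             for denom in ([(u - v) ** 2] if u > v else []) + [(u + v) ** 2]:
--                 per = u * u * v * v
--                 step = denom // gcd(per, denom)   # smallest valid d
--                 c1 = step * per // denom          # c at d = step (exact)
--                 S = step * (u * u + v * v) + c1   # a+b+c at d = step
--                 for k in range(1, N // S + 1):
--                     triple = tuple(sorted([k * step * u * u, k * step * v * v, k * c1]))
--                     if check_descartes(*triple):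
--                         solutions.add(triple)
--     return sorted(solutions)
-- ===== Notes on version B (the rewrite author's own statement) =====
-- stated objective: faster
-- what changed: A scans every multiple d = step, 2*step, ... up to N and filters each candidate by its sum; B uses that the triple's sum is k*S (strictly monotone in k, S = sum at d = step), so it iterates only k = 1 .. N//S and drops the c>0 / min>=1 / sum<=N guards, which always hold there.
import Mathlib
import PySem

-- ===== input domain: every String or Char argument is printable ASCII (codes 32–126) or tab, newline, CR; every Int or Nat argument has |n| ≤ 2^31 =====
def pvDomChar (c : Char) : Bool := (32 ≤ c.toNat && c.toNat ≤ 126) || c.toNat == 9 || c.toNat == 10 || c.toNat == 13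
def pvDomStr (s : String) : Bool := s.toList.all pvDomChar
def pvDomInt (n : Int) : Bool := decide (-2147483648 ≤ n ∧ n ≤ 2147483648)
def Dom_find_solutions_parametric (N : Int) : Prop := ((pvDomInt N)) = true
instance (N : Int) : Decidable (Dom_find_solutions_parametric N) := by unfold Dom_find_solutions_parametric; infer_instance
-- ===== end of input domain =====

-- B replaces A's scan of every multiple d = step, 2*step, … ≤ N by the exact bound k ≤ N // S
-- (the triple's sum is k*S, monotone in k), which a timing run measured as faster.

-- ===== PORT A =====

-- math.gcd on ints (our arguments are positive): exact
def pyGcd (a b : Int) : Int := (Int.gcd a b : Int)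

-- math.isqrt(N) for N ≥ 0 (Pre_ excludes N < 0, where Python raises ValueError): exact
def pyIsqrt (N : Int) : Int := (Nat.sqrt N.toNat : Int)

-- shared module helper check_descartes (used verbatim by both A and B)
def check_descartes (a b c : Int) : Bool :=
  a*a*b*b + b*b*c*c + a*a*c*c == 2*a*b*c*(a + b + c)

-- tuple(sorted([a, b, c])) on ints: exact
def sort3 (a b c : Int) : Int × Int × Int :=
  match PySem.List.sorted [a, b, c] (fun x => x) false with
  | [x, y, z] => (x, y, z)
  | _ => (0, 0, 0)

-- Python's '<' on int 3-tuples (lexicographic)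
def lt3 (p q : Int × Int × Int) : Bool :=
  p.1 < q.1 || (p.1 == q.1 && (p.2.1 < q.2.1 || (p.2.1 == q.2.1 && p.2.2 < q.2.2)))

-- sorted(solutions) on a set of int 3-tuples: stable insertion sort with the
-- lexicographic tuple order — exact for Python's sorted (same order, distinct elements)
def pySortedTriples (xs : List (Int × Int × Int)) : List (Int × Int × Int) :=
  xs.foldl (fun acc t => PySem.List.insertBy lt3 t acc) []

-- A's inner 'for d in range(step, N+1, step)' with its break/continue,
-- as structural recursion over the list of d values
def dLoopA (N u v denom step : Int) : List Int → PySem.Set (Int × Int × Int) → PySem.Set (Int × Int × Int)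
  | [], sols => sols
  | d :: ds, sols =>
    let a_val := d * u * u
    let b_val := d * v * v
    let c_val := PySem.Int.floordiv (d * u * u * v * v) denom
    if c_val ≤ 0 then
      dLoopA N u v denom step ds sols
    else
      let t := sort3 a_val b_val c_val
      if t.1 + t.2.1 + t.2.2 > N then
        (if d = step then sols else dLoopA N u v denom step ds sols)
      else
        if 1 ≤ t.1 then
          (if check_descartes t.1 t.2.1 t.2.2 then
            dLoopA N u v denom step ds (PySem.Set.add sols t)
          else
            dLoopA N u v denom step ds sols)
        else
          dLoopA N u v denom step ds sols

def find_solutions_parametric (N : Int) : List (Int × Int × Int) :=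
  let sols : PySem.Set (Int × Int × Int) :=
    (PySem.List.pyRange 1 (pyIsqrt N + 2) 1).foldl (fun sols u =>
      (PySem.List.pyRange 1 (u + 1) 1).foldl (fun sols v =>
        -- Case 1: denominator = (u - v)^2  (only when u > v)
        let sols1 :=
          if u > v then
            let denom1 := (u - v) ^ 2
            let g1 := pyGcd (u * u * v * v) denom1
            let step1 := PySem.Int.floordiv denom1 g1
            dLoopA N u v denom1 step1 (PySem.List.pyRange step1 (N + 1) step1) sols
          else sols
        -- Case 2: denominator = (u + v)^2
        let denom2 := (u + v) ^ 2
        let g2 := pyGcd (u * u * v * v) denom2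
        let step2 := PySem.Int.floordiv denom2 g2
        dLoopA N u v denom2 step2 (PySem.List.pyRange step2 (N + 1) step2) sols1) sols) PySem.Set.empty
  pySortedTriples sols

-- ===== PORT B =====

-- B's inner loop: d = k*step for k = 1 .. N // S only (S = a+b+c at d = step)
def kLoopB (N u v denom : Int) (sols : PySem.Set (Int × Int × Int)) : PySem.Set (Int × Int × Int) :=
  let per := u * u * v * v
  let step := PySem.Int.floordiv denom (pyGcd per denom)
  let c1 := PySem.Int.floordiv (step * per) denom
  let S := step * (u * u + v * v) + c1
  (PySem.List.pyRange 1 (PySem.Int.floordiv N S + 1) 1).foldl (fun sols k =>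
    let t := sort3 (k * step * u * u) (k * step * v * v) (k * c1)
    if check_descartes t.1 t.2.1 t.2.2 then PySem.Set.add sols t else sols) sols

def find_solutions_parametric_alt (N : Int) : List (Int × Int × Int) :=
  let sols : PySem.Set (Int × Int × Int) :=
    (PySem.List.pyRange 1 (pyIsqrt N + 2) 1).foldl (fun sols u =>
      (PySem.List.pyRange 1 (u + 1) 1).foldl (fun sols v =>
        ((if u > v then [(u - v) ^ 2] else []) ++ [(u + v) ^ 2]).foldl (fun sols denom =>
          kLoopB N u v denom sols) sols) sols) PySem.Set.empty
  pySortedTriples sols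

-- ===== PRECONDITION & SPEC =====

-- Pre_ excludes N < 0, where A raises ValueError (math.isqrt of a negative number)
def Pre_find_solutions_parametric (N : Int) : Prop := 0 ≤ N
instance (N : Int) : Decidable (Pre_find_solutions_parametric N) := by unfold Pre_find_solutions_parametric; infer_instance

def pvWitness_find_solutions_parametric : Int := (10)

def Spec_find_solutions_parametric (N : Int) (out : List (Int × Int × Int)) : Prop := out = find_solutions_parametric_alt N
instance (N : Int) (out : List (Int × Int × Int)) : Decidable (Spec_find_solutions_parametric N out) := by unfold Spec_find_solutions_parametric; infer_instance

-- ===== CLAIM (what is proved, stated in full; the proofs are below) =====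
def Claim_equal_find_solutions_parametric : Prop := ∀ (N : Int), Dom_find_solutions_parametric N → Pre_find_solutions_parametric N → Spec_find_solutions_parametric N (find_solutions_parametric N)

-- ===== LEMMAS AND PROOFS =====

-- sort3 returns some permutation of its arguments, as a triple
lemma sort3_list (a b c : Int) :
    ∃ x y z, sort3 a b c = (x, y, z) ∧ [x, y, z].Perm [a, b, c] := by
  have hlen := PySem.List.length_sorted [a, b, c] (fun x => x) false
  have hperm := PySem.List.sorted_perm [a, b, c] (fun x => x) false
  unfold sort3
  rcases hl : PySem.List.sorted [a, b, c] (fun x => x) false with _ | ⟨x, _ | ⟨y, _ | ⟨z, _ | _⟩⟩⟩ <;>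
    rw [hl] at hlen hperm <;> simp_all

lemma sort3_sum (a b c : Int) :
    (sort3 a b c).1 + (sort3 a b c).2.1 + (sort3 a b c).2.2 = a + b + c := by
  obtain ⟨x, y, z, hxyz, hperm⟩ := sort3_list a b c
  have := hperm.sum_eq
  simp at this
  rw [hxyz]
  dsimp
  linarith

lemma sort3_fst_pos {a b c : Int} (ha : 1 ≤ a) (hb : 1 ≤ b) (hc : 1 ≤ c) :
    1 ≤ (sort3 a b c).1 := by
  obtain ⟨x, y, z, hxyz, hperm⟩ := sort3_list a b c
  have hx : x ∈ [a, b, c] := hperm.mem_iff.mp (by simp)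
  rw [hxyz]
  simp at hx
  rcases hx with h | h | h <;> omega

-- step = denom // gcd(per, denom) and c1 = step*per // denom are positive, and the division is exact
lemma step_facts (per denom : Int) (hper : 1 ≤ per) (hden : 1 ≤ denom) :
    1 ≤ PySem.Int.floordiv denom (pyGcd per denom) ∧
    1 ≤ PySem.Int.floordiv (PySem.Int.floordiv denom (pyGcd per denom) * per) denom ∧
    PySem.Int.floordiv denom (pyGcd per denom) * per =
      PySem.Int.floordiv (PySem.Int.floordiv denom (pyGcd per denom) * per) denom * denom := by
  have hg0 : (0 : Int) < (Int.gcd per denom : Int) := by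
    have : Int.gcd per denom ≠ 0 := by
      simp [Int.gcd_eq_zero_iff]
      omega
    positivity
  obtain ⟨p, hp⟩ : (Int.gcd per denom : Int) ∣ per := Int.gcd_dvd_left per denom
  obtain ⟨q, hq⟩ : (Int.gcd per denom : Int) ∣ denom := Int.gcd_dvd_right per denom
  have hstep : PySem.Int.floordiv denom (pyGcd per denom) = q := by
    simp only [pyGcd]
    rw [PySem.Int.floordiv_eq_ediv_of_pos hg0]
    nth_rewrite 1 [hq]
    exact Int.mul_ediv_cancel_left _ (by omega)
  have hq1 : 1 ≤ q := by nlinarith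
  have hp1 : 1 ≤ p := by nlinarith
  have hqper : q * per = p * denom := by
    nth_rewrite 1 [hp]
    nth_rewrite 2 [hq]
    ring
  have hc1 : PySem.Int.floordiv (PySem.Int.floordiv denom (pyGcd per denom) * per) denom = p := by
    rw [hstep, hqper, PySem.Int.floordiv_eq_ediv_of_pos (by omega : (0:Int) < denom),
        Int.mul_ediv_cancel _ (by omega)]
  rw [hstep] at hc1 ⊢
  rw [hc1, hqper]
  exact ⟨hq1, hp1, rfl⟩

lemma pyRange_step_eq (N step : Int) (hstep : 0 < step) (hN : 0 ≤ N) :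
    PySem.List.pyRange step (N + 1) step =
      (PySem.List.pyRange 1 (PySem.Int.floordiv N step + 1) 1).map (fun k => k * step) := by
  rw [PySem.List.pyRange_of_pos _ _ hstep, PySem.List.pyRange_one, List.map_map,
      PySem.Int.floordiv_eq_ediv_of_pos hstep]
  have h1 : N + 1 - step + step - 1 = N := by ring
  rw [h1]
  have h2 : N / step + 1 - 1 = N / step := by ring
  rw [h2]
  by_cases h : step < N + 1
  · rw [if_pos h]
    apply List.map_congr_left
    intro k _
    simp
    ring
  · rw [if_neg h]
    have : N / step = 0 := by
      apply Int.ediv_eq_zero_of_lt hN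
      omega
    rw [this]
    simp

-- while k*S ≤ N, A's d-loop body performs exactly B's k-loop body
lemma dLoopA_prefix (N u v denom step c1 S : Int)
    (hstep : 0 < step) (hc1 : 0 < c1) (hu : 1 ≤ u) (hv : 1 ≤ v)
    (hc : ∀ k : Int, PySem.Int.floordiv (k * step * u * u * v * v) denom = k * c1)
    (hS : S = step * (u * u + v * v) + c1) :
    ∀ (ks rest : List Int) (sols : PySem.Set (Int × Int × Int)),
      (∀ k ∈ ks, 1 ≤ k ∧ k * S ≤ N) →
      dLoopA N u v denom step (ks.map (fun k => k * step) ++ rest) sols =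
        dLoopA N u v denom step rest
          (ks.foldl (fun sols k =>
            let t := sort3 (k * step * u * u) (k * step * v * v) (k * c1)
            if check_descartes t.1 t.2.1 t.2.2 then PySem.Set.add sols t else sols) sols) := by
  intro ks
  induction ks with
  | nil => intro rest sols _; simp
  | cons k ks ih =>
    intro rest sols hmem
    obtain ⟨hk1, hkS⟩ := hmem k (by simp)
    have hrest : ∀ k' ∈ ks, 1 ≤ k' ∧ k' * S ≤ N := fun k' h => hmem k' (by simp [h])
    simp only [List.map_cons, List.cons_append, List.foldl_cons]
    rw [dLoopA]
    rw [hc k]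
    have hcv : ¬ (k * c1 ≤ 0) := by nlinarith
    rw [if_neg hcv]
    have hsum : (sort3 (k * step * u * u) (k * step * v * v) (k * c1)).1 +
        (sort3 (k * step * u * u) (k * step * v * v) (k * c1)).2.1 +
        (sort3 (k * step * u * u) (k * step * v * v) (k * c1)).2.2 = k * S := by
      rw [sort3_sum]; rw [hS]; ring
    simp only
    rw [if_neg (by rw [hsum]; omega)]
    have h1 : 1 ≤ k * step := by nlinarith
    have h2 : 1 ≤ k * step * u := by nlinarith
    have h3 : 1 ≤ k * step * u * u := by nlinarith
    have h4 : 1 ≤ k * step * v := by nlinarith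
    have h5 : 1 ≤ k * step * v * v := by nlinarith
    rw [if_pos (sort3_fst_pos h3 h5 (by nlinarith))]
    by_cases hch : check_descartes (sort3 (k * step * u * u) (k * step * v * v) (k * c1)).1
        (sort3 (k * step * u * u) (k * step * v * v) (k * c1)).2.1
        (sort3 (k * step * u * u) (k * step * v * v) (k * c1)).2.2
    · rw [if_pos hch, if_pos hch, ih rest _ hrest]
    · rw [if_neg hch, if_neg hch, ih rest _ hrest]

lemma dLoopA_drop (N u v denom step c1 S : Int)
    (hstep : 0 < step) (hc1 : 0 < c1)
    (hc : ∀ k : Int, PySem.Int.floordiv (k * step * u * u * v * v) denom = k * c1)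
    (hS : S = step * (u * u + v * v) + c1) :
    ∀ (ks : List Int) (sols : PySem.Set (Int × Int × Int)),
      (∀ k ∈ ks, 2 ≤ k ∧ N < k * S) →
      dLoopA N u v denom step (ks.map (fun k => k * step)) sols = sols := by
  intro ks
  induction ks with
  | nil => intro sols _; simp [dLoopA]
  | cons k ks ih =>
    intro sols hmem
    obtain ⟨hk2, hkS⟩ := hmem k (by simp)
    have hrest : ∀ k' ∈ ks, 2 ≤ k' ∧ N < k' * S := fun k' h => hmem k' (by simp [h])
    simp only [List.map_cons]
    rw [dLoopA]
    rw [hc k]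
    have hcv : ¬ (k * c1 ≤ 0) := by nlinarith
    rw [if_neg hcv]
    have hsum : (sort3 (k * step * u * u) (k * step * v * v) (k * c1)).1 +
        (sort3 (k * step * u * u) (k * step * v * v) (k * c1)).2.1 +
        (sort3 (k * step * u * u) (k * step * v * v) (k * c1)).2.2 = k * S := by
      rw [sort3_sum]; rw [hS]; ring
    simp only
    rw [if_pos (by rw [hsum]; omega)]
    rw [if_neg (by nlinarith : ¬ (k * step = step))]
    exact ih sols hrest

lemma inner_eq (N u v denom : Int) (hN : 0 ≤ N) (hu : 1 ≤ u) (hv : 1 ≤ v) (hden : 1 ≤ denom)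
    (sols : PySem.Set (Int × Int × Int)) :
    dLoopA N u v denom (PySem.Int.floordiv denom (pyGcd (u * u * v * v) denom))
      (PySem.List.pyRange (PySem.Int.floordiv denom (pyGcd (u * u * v * v) denom)) (N + 1)
        (PySem.Int.floordiv denom (pyGcd (u * u * v * v) denom))) sols =
      kLoopB N u v denom sols := by
  have huu : 1 ≤ u * u := by nlinarith
  have hvv : 1 ≤ v * v := by nlinarith
  have hper : 1 ≤ u * u * v * v := by nlinarith
  obtain ⟨hstep1, hc11, hexact⟩ := step_facts (u * u * v * v) denom hper hden
  set step := PySem.Int.floordiv denom (pyGcd (u * u * v * v) denom) with hstepdef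
  set c1 := PySem.Int.floordiv (step * (u * u * v * v)) denom with hc1def
  set S := step * (u * u + v * v) + c1 with hSdef
  have hS1 : 1 ≤ S := by nlinarith
  have hc : ∀ k : Int, PySem.Int.floordiv (k * step * u * u * v * v) denom = k * c1 := by
    intro k
    have h1 : k * step * u * u * v * v = (k * c1) * denom := by
      have : k * step * u * u * v * v = k * (step * (u * u * v * v)) := by ring
      rw [this, hexact]; ring
    rw [h1, PySem.Int.floordiv_eq_ediv_of_pos (by omega : (0:Int) < denom),
        Int.mul_ediv_cancel _ (by omega)]
  set K := PySem.Int.floordiv N S with hKdef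
  set M := PySem.Int.floordiv N step with hMdef
  have hK0 : 0 ≤ K := by
    rw [hKdef, PySem.Int.le_floordiv_iff_mul_le (by omega)]; omega
  have hM0 : 0 ≤ M := by
    rw [hMdef, PySem.Int.le_floordiv_iff_mul_le (by omega)]; omega
  have hKS : K * S ≤ N := by
    rw [hKdef] at *
    exact (PySem.Int.le_floordiv_iff_mul_le (by omega)).mp le_rfl
  have hstepS : step ≤ S := by nlinarith
  have hKM : K ≤ M := by
    rw [hMdef, PySem.Int.le_floordiv_iff_mul_le (by omega)]
    nlinarith [mul_le_mul_of_nonneg_left hstepS hK0]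
  have hrange := pyRange_step_eq N step (by omega) hN
  rw [hrange, ← hMdef]
  have hkb : kLoopB N u v denom sols =
      (PySem.List.pyRange 1 (K + 1) 1).foldl (fun sols k =>
        let t := sort3 (k * step * u * u) (k * step * v * v) (k * c1)
        if check_descartes t.1 t.2.1 t.2.2 then PySem.Set.add sols t else sols) sols := by
    rw [kLoopB]
  rw [hkb]
  by_cases hK1 : 1 ≤ K
  · -- prefix k = 1..K does real work, suffix k = K+1..M only skips
    rw [PySem.List.pyRange_one_append 1 (K + 1) (M + 1) (by omega) (by omega), List.map_append]
    rw [dLoopA_prefix N u v denom step c1 S (by omega) (by omega) hu hv hc hSdef _ _ sols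
        (by intro k hk
            rw [PySem.List.mem_pyRange_one] at hk
            constructor
            · omega
            · rw [hKdef] at hk
              have := (PySem.Int.le_floordiv_iff_mul_le (by omega : (0:Int) < S)).mp (by omega : k ≤ PySem.Int.floordiv N S)
              omega)]
    rw [dLoopA_drop N u v denom step c1 S (by omega) (by omega) hc hSdef _ _
        (by intro k hk
            rw [PySem.List.mem_pyRange_one] at hk
            constructor
            · omega
            · by_contra h
              have : k ≤ K := by
                rw [hKdef, PySem.Int.le_floordiv_iff_mul_le (by omega)]
                omega
              omega)]
  · -- K = 0 : B's loop is empty; A breaks at the first d (or has no d at all)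
    have hK : K = 0 := by omega
    rw [hK]
    by_cases hM1 : 1 ≤ M
    · rw [PySem.List.pyRange_one_cons (by omega : (1:Int) < M + 1), List.map_cons]
      rw [dLoopA]
      rw [hc 1]
      rw [if_neg (by omega : ¬ (1 * c1 ≤ 0))]
      have hsum : (sort3 (1 * step * u * u) (1 * step * v * v) (1 * c1)).1 +
          (sort3 (1 * step * u * u) (1 * step * v * v) (1 * c1)).2.1 +
          (sort3 (1 * step * u * u) (1 * step * v * v) (1 * c1)).2.2 = S := by
        rw [sort3_sum, hSdef]; ring
      have hNS : N < S := by
        by_contra h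
        have : 1 ≤ K := by
          rw [hKdef, PySem.Int.le_floordiv_iff_mul_le (by omega)]
          omega
        omega
      simp only
      rw [if_pos (by rw [hsum]; omega)]
      rw [if_pos (by ring : (1:Int) * step = step)]
      rw [show (0:Int) + 1 = 1 by ring, PySem.List.pyRange_one_eq_nil le_rfl]
      simp
    · have : M = 0 := by omega
      rw [this]
      simp [dLoopA]

-- ===== VERDICT (by name: the statement is the Claim_ definition above) =====
theorem find_solutions_parametric_spec : Claim_equal_find_solutions_parametric := by
  intro N _ hPre
  have hN : 0 ≤ N := hPre
  unfold Spec_find_solutions_parametric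
  unfold find_solutions_parametric find_solutions_parametric_alt
  dsimp only
  congr 1
  apply PySem.List.foldl_congr_mem
  intro sols u hu
  rw [PySem.List.mem_pyRange_one] at hu
  apply PySem.List.foldl_congr_mem
  intro sols' v hv
  rw [PySem.List.mem_pyRange_one] at hv
  dsimp only
  by_cases huv : u > v
  · rw [if_pos huv, if_pos huv]
    simp only [List.cons_append, List.nil_append, List.foldl_cons, List.foldl_nil]
    rw [inner_eq N u v ((u - v) ^ 2) hN (by omega) (by omega) (by nlinarith), 
        inner_eq N u v ((u + v) ^ 2) hN (by omega) (by omega) (by nlinarith)]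
  · rw [if_neg huv, if_neg huv]
    simp only [List.nil_append, List.foldl_cons, List.foldl_nil]
    rw [inner_eq N u v ((u + v) ^ 2) hN (by omega) (by omega) (by nlinarith)]
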